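-- pv_equiv track=rewrite | github.com/asdfghjkxd/fakePy | pe.py | next_idx
-- ===== SOURCE A (Python) =====
-- def next_idx(idx, shape):
--     if len(shape) == 0:
--         return None  # reach the max already
--     else:
--         if idx[-1] == shape[-1] - 1:
--             temp = next_idx(idx[:-1], shape[:-1])
--             if temp is None:  # need this to avoid error...boundary condition can check.
--                 return None
--             else:
--                 return temp + [0]
--         else:
--             idx[-1] += 1
--             return idx
-- ===== SOURCE B (Python) =====
-- def next_idx(idx, shape):
--     # Right-to-left scan: count trailing maxed dimensions, then rebuild once.
--     k = 0
--     while k < len(shape) and idx[-1 - k] == shape[-1 - k] - 1: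
--         k += 1
--     if k == len(shape):
--         return None
--     if k == 0:
--         idx[-1] += 1
--         return idx
--     return idx[:-k - 1] + [idx[-1 - k] + 1] + [0] * k
-- ===== Notes on version B (the rewrite author's own statement) =====
-- stated objective: alternative
-- what changed: Replaces A's per-level recursion on idx[:-1]/shape[:-1] slices by a single right-to-left scan that counts the trailing maxed dimensions (k) and then builds the result once as idx[:-k-1] + [idx[-1-k]+1] + [0]*k, mutating idx in place only in the k=0 case exactly as A does.
import Mathlib
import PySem

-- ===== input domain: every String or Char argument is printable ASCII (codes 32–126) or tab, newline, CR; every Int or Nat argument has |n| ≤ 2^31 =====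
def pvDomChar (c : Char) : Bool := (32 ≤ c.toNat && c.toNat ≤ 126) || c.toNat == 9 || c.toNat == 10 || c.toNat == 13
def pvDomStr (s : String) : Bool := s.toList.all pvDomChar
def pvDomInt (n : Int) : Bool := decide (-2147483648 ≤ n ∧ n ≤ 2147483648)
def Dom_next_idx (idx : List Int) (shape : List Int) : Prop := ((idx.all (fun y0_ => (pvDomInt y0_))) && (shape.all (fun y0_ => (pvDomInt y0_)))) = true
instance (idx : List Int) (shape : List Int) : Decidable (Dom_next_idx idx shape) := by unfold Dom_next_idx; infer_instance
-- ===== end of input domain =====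

-- B replaces A's slice-per-level recursion by a single right-to-left scan that counts the
-- trailing maxed dimensions and rebuilds the result once (objective: alternative decomposition).
-- A mutates idx in place only when the last digit is not maxed; B performs the same mutation
-- in Python; the equivalence proved here is about the RETURN value.

-- ===== PORT A =====
def next_idx (idx : List Int) (shape : List Int) : Option (List Int) :=
  if _h0 : shape.length = 0 then none
  else
    match PySem.List.pyGet? idx (-1), PySem.List.pyGet? shape (-1) with
    | some a, some b =>
      if a = b - 1 then
        match next_idx (PySem.List.slice idx none (some (-1))) (PySem.List.slice shape none (some (-1))) with
        | none => none
        | some temp => some (temp ++ [0])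
      else some (PySem.List.pySetD idx (-1) (a + 1))   -- idx[-1] += 1; return idx
    | _, _ => none  -- idx[-1] raises IndexError in Python here; excluded by Pre_next_idx
termination_by shape.length
decreasing_by simp [PySem.List.slice_to_neg_one]; omega

-- ===== PORT B =====
-- the scan 'k = 0; while k < len(shape) and idx[-1-k] == shape[-1-k] - 1: k += 1'
def next_idx_alt_loop (idx : List Int) (shape : List Int) (k : Nat) : Nat :=
  if _h : k < shape.length then
    match PySem.List.pyGet? idx (-1 - (k : Int)), PySem.List.pyGet? shape (-1 - (k : Int)) with
    | some a, some b => if a = b - 1 then next_idx_alt_loop idx shape (k + 1) else k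
    | none, _ => k       -- idx[-1-k] raises IndexError in Python here; excluded by Pre_next_idx
    | some _, none => k  -- unreachable: the guard k < len(shape) holds
  else k
termination_by shape.length - k

def next_idx_alt (idx : List Int) (shape : List Int) : Option (List Int) :=
  let k := next_idx_alt_loop idx shape 0
  if k = shape.length then none
  else if k = 0 then
    some (PySem.List.pySetD idx (-1) (PySem.List.pyGetD idx (-1) 0 + 1))   -- idx[-1] += 1; return idx
  else
    some (PySem.List.slice idx none (some (-(k : Int) - 1)) ++
          [PySem.List.pyGetD idx (-1 - (k : Int)) 0 + 1] ++ List.replicate k 0)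

-- ===== PRECONDITION & SPEC =====
-- Pre_ excludes exactly the inputs where Python A raises IndexError (idx exhausted while every
-- one of its digits is maxed and shape still has dimensions left); Python B raises there too.
def Pre_next_idx (idx : List Int) (shape : List Int) : Prop :=
  ¬ (idx.length < shape.length ∧
     (idx.reverse.zip shape.reverse).all (fun p => p.1 == p.2 - 1) = true)
instance (idx : List Int) (shape : List Int) : Decidable (Pre_next_idx idx shape) := by
  unfold Pre_next_idx; infer_instance

def pvWitness_next_idx : List Int × List Int := ([0, 1], [2, 2])

def Spec_next_idx (idx : List Int) (shape : List Int) (out : Option (List Int)) : Prop := out = next_idx_alt idx shape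
instance (idx : List Int) (shape : List Int) (out : Option (List Int)) : Decidable (Spec_next_idx idx shape out) := by unfold Spec_next_idx; infer_instance

-- ===== CLAIM (what is proved, stated in full; the proofs are below) =====
def Claim_equal_next_idx : Prop := ∀ (idx : List Int) (shape : List Int), Dom_next_idx idx shape → Pre_next_idx idx shape → Spec_next_idx idx shape (next_idx idx shape)

-- ===== LEMMAS AND PROOFS =====

theorem pyGet?_neg_rev (xs : List Int) (k : Nat) :
    PySem.List.pyGet? xs (-1 - (k : Int)) = xs.reverse[k]? := by
  rcases Nat.lt_or_ge k xs.length with h | h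
  · have hc : (-1 - (k : Int)) = -(((k + 1 : Nat) : Int)) := by push_cast; ring
    rw [hc, PySem.List.pyGet?_neg_natCast xs (k + 1) (by omega) (by omega),
        List.getElem?_reverse h]
    congr 1
    omega
  · have h2 : xs.reverse[k]? = none := by simp [h]
    rw [h2, PySem.List.pyGet?_eq_none_iff]
    simp [PySem.Raise.InRange]
    omega

theorem drop_rev_cons (xs : List Int) (k : Nat) (v : Int)
    (h : PySem.List.pyGet? xs (-1 - (k : Int)) = some v) :
    xs.reverse.drop k = v :: xs.reverse.drop (k + 1) := by
  have h' : xs.reverse[k]? = some v := (pyGet?_neg_rev xs k) ▸ h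
  obtain ⟨hk, hv⟩ := List.getElem?_eq_some_iff.mp h'
  rw [List.drop_eq_getElem_cons hk, hv]

theorem loop_eq_tw (idx shape : List Int) (k : Nat) :
    next_idx_alt_loop idx shape k =
      k + (((idx.reverse.drop k).zip (shape.reverse.drop k)).takeWhile
            (fun p => p.1 == p.2 - 1)).length := by
  induction k using next_idx_alt_loop.induct (idx := idx) (shape := shape) with
  | case1 k hk a hs hi ih =>
    rw [next_idx_alt_loop, dif_pos hk]
    simp only [hi, hs]
    rw [drop_rev_cons idx k _ hi, drop_rev_cons shape k _ hs, List.zip_cons_cons,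
        List.takeWhile_cons]
    simp only [ih]
    norm_num
    omega
  | case2 k hk a b hi hs hne =>
    rw [next_idx_alt_loop, dif_pos hk]
    simp only [hs, hi]
    rw [drop_rev_cons idx k _ hs, drop_rev_cons shape k _ hi, List.zip_cons_cons,
        List.takeWhile_cons]
    simp [hne]
  | case3 k hk hi =>
    rw [next_idx_alt_loop, dif_pos hk, hi]
    have : idx.reverse.drop k = [] := by
      rw [List.drop_eq_nil_iff]
      have h2 := pyGet?_neg_rev idx k
      rw [hi] at h2
      have := List.getElem?_eq_none_iff.mp h2.symm
      simpa using this
    rw [this]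
    simp
  | case4 k hk a hi hs =>
    exfalso
    have h2 := pyGet?_neg_rev shape k
    rw [hi] at h2
    have := List.getElem?_eq_none_iff.mp h2.symm
    simp at this
    omega
  | case5 k hk =>
    rw [next_idx_alt_loop, dif_neg hk]
    have : shape.reverse.drop k = [] := by
      rw [List.drop_eq_nil_iff]
      simpa using Nat.le_of_not_lt hk
    rw [this]
    simp

theorem slice_negk (xs : List Int) (m : Nat) :
    PySem.List.slice xs none (some (-(m : Int) - 1)) = xs.take (xs.length - (m + 1)) := by
  have hc : (-(m : Int) - 1) = -(((m + 1 : Nat)) : Int) := by push_cast; ring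
  rw [hc, PySem.List.slice_to_neg_natCast _ _ (by omega)]

theorem getD_negk (xs : List Int) (m : Nat) (hm : m + 1 ≤ xs.length) :
    PySem.List.pyGetD xs (-1 - (m : Int)) 0 = xs[xs.length - (m + 1)]'(by omega) := by
  have hc : (-1 - (m : Int)) = -(((m + 1 : Nat)) : Int) := by push_cast; ring
  rw [hc, PySem.List.pyGetD_neg_natCast _ _ _ (by omega) (by omega)]

theorem pySetD_neg_one_concat (xs : List Int) (x v : Int) :
    PySem.List.pySetD (xs ++ [x]) (-1) v = xs ++ [v] := by
  simp [PySem.List.pySetD, PySem.List.pySet?, PySem.List.pyIdx?]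

theorem main_eq (shape : List Int) : ∀ (idx : List Int), Pre_next_idx idx shape →
    next_idx idx shape = next_idx_alt idx shape := by
  induction shape using List.reverseRecOn with
  | nil =>
    intro idx _
    rw [next_idx]
    simp [next_idx_alt, next_idx_alt_loop]
  | append_singleton s' b ih =>
    intro idx hPre
    rcases List.eq_nil_or_concat idx with rfl | ⟨i', a, rfl⟩
    · simp [Pre_next_idx] at hPre
    · simp only [List.concat_eq_append] at *
      -- loop value
      have hloop := loop_eq_tw (i' ++ [a]) (s' ++ [b]) 0
      simp only [List.drop_zero, List.reverse_append, List.reverse_singleton,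
        List.singleton_append, List.zip_cons_cons, List.takeWhile_cons] at hloop
      -- A reduced to the some/some branch
      rw [next_idx, dif_neg (by simp : ¬((s' ++ [b]).length = 0))]
      simp only [PySem.List.pyGet?_neg_one_append_singleton]
      by_cases hab : a = b - 1
      · simp only [if_pos hab]
        have hslI : PySem.List.slice (i' ++ [a]) none (some (-1)) = i' := by
          rw [PySem.List.slice_to_neg_one]; simp
        have hslS : PySem.List.slice (s' ++ [b]) none (some (-1)) = s' := by
          rw [PySem.List.slice_to_neg_one]; simp
        rw [hslI, hslS]
        set m' := (List.takeWhile (fun p => p.1 == p.2 - 1) (i'.reverse.zip s'.reverse)).length with hm'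
        have hl : next_idx_alt_loop (i' ++ [a]) (s' ++ [b]) 0 = m' + 1 := by
          rw [hloop]; simp [hab, ← hm']
        have hPre' : Pre_next_idx i' s' := by
          rintro ⟨h1, h2⟩
          refine hPre ⟨by simp; omega, ?_⟩
          simp only [List.reverse_append, List.reverse_singleton, List.singleton_append,
            List.zip_cons_cons, List.all_cons, h2]
          simp [hab]
        have hIH := ih i' hPre'
        rw [hIH]
        have hmle : m' ≤ min i'.length s'.length := by
          have := (List.takeWhile_sublist (l := i'.reverse.zip s'.reverse)
            (p := fun p => p.1 == p.2 - 1)).length_le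
          simpa [List.length_zip] using this
        have hl' : next_idx_alt_loop i' s' 0 = m' := by
          rw [hm']
          simpa using loop_eq_tw i' s' 0
        by_cases hms : m' = s'.length
        · rw [next_idx_alt, next_idx_alt]
          simp only [hl, hl']
          rw [if_pos hms, if_pos (by simp [hms])]
        · have hmlt : m' < i'.length := by
            rcases Nat.lt_or_ge m' i'.length with h | h
            · exact h
            · exfalso
              have hz : m' = (i'.reverse.zip s'.reverse).length := by
                simp only [List.length_zip, List.length_reverse] at hmle ⊢
                omega
              have h2 : (i'.reverse.zip s'.reverse).takeWhile (fun p => p.1 == p.2 - 1)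
                  = i'.reverse.zip s'.reverse :=
                (List.takeWhile_sublist _).eq_of_length (by omega)
              have hall : ∀ x ∈ i'.reverse.zip s'.reverse, (fun (p : Int × Int) => p.1 == p.2 - 1) x := by
                intro x hx
                have hx2 : x ∈ (i'.reverse.zip s'.reverse).takeWhile
                    (fun p => p.1 == p.2 - 1) := by rw [h2]; exact hx
                have h3 := List.mem_takeWhile_imp (p := fun q : Int × Int => q.1 == q.2 - 1) hx2
                simpa using h3
              have hilen : i'.length < s'.length := by
                simp only [List.length_zip, List.length_reverse] at hz
                omega
              exact hPre' ⟨hilen, List.all_eq_true.mpr hall⟩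
          have hlenE : (i' ++ [a]).length - (m' + 1 + 1) = i'.length - (m' + 1) := by
            simp only [List.length_append, List.length_singleton]
            omega
          have hE1 : PySem.List.slice (i' ++ [a]) none (some (-((m' + 1 : Nat) : Int) - 1))
              = i'.take (i'.length - (m' + 1)) := by
            rw [slice_negk, hlenE,
              List.take_append_of_le_length (by omega)]
          have hE2 : PySem.List.pyGetD (i' ++ [a]) (-1 - ((m' + 1 : Nat) : Int)) 0
              = i'[i'.length - (m' + 1)]'(by omega) := by
            rw [getD_negk _ _ (by simp only [List.length_append, List.length_singleton]; omega)]
            simp only [hlenE]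
            rw [List.getElem_append_left (by omega)]
          rw [next_idx_alt, next_idx_alt]
          simp only [hl, hl']
          rw [if_neg hms,
            if_neg (by simp only [List.length_append, List.length_singleton]; omega :
              ¬(m' + 1 = (s' ++ [b]).length)),
            if_neg (by omega : ¬(m' + 1 = 0))]
          by_cases hm0 : m' = 0
          · rw [if_pos hm0]
            rcases List.eq_nil_or_concat i' with rfl | ⟨j, w, rfl⟩
            · simp at hmlt
            · simp only [List.concat_eq_append] at *
              rw [pySetD_neg_one_concat, PySem.List.pyGetD_neg_one_append_singleton, hE1, hE2]
              have h3 : (j ++ [w]).take ((j ++ [w]).length - (m' + 1)) = j := by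
                rw [hm0]
                simp
              have h4 : (j ++ [w])[(j ++ [w]).length - (m' + 1)]'(by
                  simp only [List.length_append, List.length_singleton]; omega) = w := by
                simp only [hm0, List.length_append, List.length_singleton,
                  Nat.add_sub_cancel]
                rw [List.getElem_append_right (by omega)]
                simp
              rw [h3, h4, hm0]
              simp
          · rw [if_neg hm0, hE1, hE2, slice_negk, getD_negk _ _ (by omega)]
            simp [List.replicate_succ']
      · simp only [if_neg hab]
        -- B: loop = 0
        have hl0 : next_idx_alt_loop (i' ++ [a]) (s' ++ [b]) 0 = 0 := by
          rw [hloop]; simp [hab]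
        rw [next_idx_alt]
        simp only [hl0, if_neg (by simp : ¬(0 = (s' ++ [b]).length))]
        rw [PySem.List.pyGetD_neg_one_append_singleton]
        simp

-- ===== VERDICT (by name: the statement is the Claim_ definition above) =====
theorem next_idx_spec : Claim_equal_next_idx := by
  intro idx shape _ hPre
  exact main_eq shape idx hPre
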